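-- pv_equiv track=rewrite | github.com/ttasjwi/algorithm | 문제풀이/온라인 저지/프로그래머스/# 02. Level 2/# 086971. 전력망을 둘로 나누기/python/solution.py | get_tree_size
-- ===== SOURCE A (Python) =====
-- from collections import deque
--
-- def get_tree_size(start, ignore, nodes):
--     visited = [False] * len(nodes)
--     visited[start] = True
--     visited[ignore] = True
--     queue = deque([start])
--
--     count = 1
--     while queue:
--         for _ in range(len(queue)):
--             current_node = queue.popleft()
--
--             for near_node in nodes[current_node]:
--                 if not visited[near_node]:
--                     count += 1
--                     visited[near_node] = True
--                     queue.append(near_node)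
--     return count
-- ===== SOURCE B (Python) =====
-- def get_tree_size(start, ignore, nodes):
--     n = len(nodes)
--     visited = [False] * n
--     visited[start] = True
--     visited[ignore] = True
--     reach = [False] * n
--     reach[start] = True
--     changed = True
--     while changed:
--         changed = False
--         for u in range(n):
--             if reach[u]:
--                 for near in nodes[u]:
--                     if not visited[near]:
--                         visited[near] = True
--                         reach[near] = True
--                         changed = True
--     return sum(reach)
-- ===== Notes on version B (the rewrite author's own statement) =====
-- stated objective: alternative
-- what changed: Replaced A's deque-based level-batched BFS by a fixed-point sweep: B keeps a 'reach' boolean array and repeatedly scans all nodes, propagating reachability from every already-reached node to its unvisited neighbours, until a full pass changes nothing; the answer is the popcount of 'reach' instead of an incremented counter.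
import Mathlib
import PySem

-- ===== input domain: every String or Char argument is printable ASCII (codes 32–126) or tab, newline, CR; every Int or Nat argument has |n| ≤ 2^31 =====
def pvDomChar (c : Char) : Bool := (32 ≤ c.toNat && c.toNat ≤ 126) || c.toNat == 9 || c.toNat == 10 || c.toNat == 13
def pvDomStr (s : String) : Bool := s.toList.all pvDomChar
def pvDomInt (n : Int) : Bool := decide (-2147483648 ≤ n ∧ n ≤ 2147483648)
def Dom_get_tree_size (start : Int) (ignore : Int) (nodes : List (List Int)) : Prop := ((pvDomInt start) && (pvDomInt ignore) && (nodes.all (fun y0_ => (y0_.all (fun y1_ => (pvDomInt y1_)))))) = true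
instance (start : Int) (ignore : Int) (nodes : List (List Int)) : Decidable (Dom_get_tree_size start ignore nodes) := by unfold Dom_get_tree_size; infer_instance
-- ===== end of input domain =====

-- B replaces A's BFS queue traversal by a fixed-point sweep (repeated full scans that
-- propagate reachability from already-reached nodes until a pass changes nothing);
-- objective: alternative algorithm, not faster.

-- ===== PORT A =====
-- inner "for near in nodes[current]" loop body: state (visited, count, queue)
def pvA_scan (st : List Bool × Int × List Int) (near : Int) : List Bool × Int × List Int :=
  if PySem.List.pyGetD st.1 near false = false then
    (PySem.List.pySetD st.1 near true, st.2.1 + 1, st.2.2 ++ [near])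
  else st

-- "for _ in range(len(queue))": pop k nodes, scanning each one's neighbours
def pvA_level (nodes : List (List Int)) : Nat → List Int → List Bool → Int → List Int × List Bool × Int
  | 0, q, v, c => (q, v, c)
  | _ + 1, [], v, c => ([], v, c)   -- popleft on empty deque: unreachable under Pre_
  | k + 1, cur :: q, v, c =>
      let st := (PySem.List.pyGetD nodes cur []).foldl pvA_scan (v, c, q)
      pvA_level nodes k st.2.2 st.1 st.2.1

-- "while queue": fuel (nodes.length + 1) provably suffices under Pre_ (each round
-- that leaves the queue nonempty marks a fresh node)
def pvA_loop (nodes : List (List Int)) : Nat → List Int → List Bool → Int → Int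
  | 0, _, _, c => c
  | f + 1, q, v, c =>
      if q = [] then c
      else
        let st := pvA_level nodes q.length q v c
        pvA_loop nodes f st.1 st.2.1 st.2.2

def get_tree_size (start : Int) (ignore : Int) (nodes : List (List Int)) : Int :=
  let visited := PySem.List.pySetD (PySem.List.pySetD (List.replicate nodes.length false) start true) ignore true
  pvA_loop nodes (nodes.length + 1) [start] visited 1

-- ===== PORT B =====
-- "for near in nodes[u]" body: state (visited, reach, changed)
def pvB_near (st : List Bool × List Bool × Bool) (near : Int) : List Bool × List Bool × Bool :=
  if PySem.List.pyGetD st.1 near false = false then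
    (PySem.List.pySetD st.1 near true, PySem.List.pySetD st.2.1 near true, true)
  else st

-- "for u in range(n): if reach[u]: ..."
def pvB_row (nodes : List (List Int)) (st : List Bool × List Bool × Bool) (u : Int) : List Bool × List Bool × Bool :=
  if PySem.List.pyGetD st.2.1 u false = true then
    (PySem.List.pyGetD nodes u []).foldl pvB_near st
  else st

-- "while changed": fuel (nodes.length + 2) provably suffices (every changing pass
-- marks a fresh node)
def pvB_loop (nodes : List (List Int)) : Nat → List Bool → List Bool → Bool → List Bool × List Bool
  | 0, v, r, _ => (v, r)
  | f + 1, v, r, changed =>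
      if changed then
        let st := (PySem.List.pyRange 0 (nodes.length : Int) 1).foldl (pvB_row nodes) (v, r, false)
        pvB_loop nodes f st.1 st.2.1 st.2.2
      else (v, r)

def get_tree_size_alt (start : Int) (ignore : Int) (nodes : List (List Int)) : Int :=
  let visited := PySem.List.pySetD (PySem.List.pySetD (List.replicate nodes.length false) start true) ignore true
  let reach := PySem.List.pySetD (List.replicate nodes.length false) start true
  let st := pvB_loop nodes (nodes.length + 2) visited reach true
  st.2.foldl (fun acc b => acc + (if b then 1 else 0)) 0

-- ===== PRECONDITION & SPEC =====
-- normalisation of a Python index (matches PySem.List.pyIdx? on in-range indices)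
def nrmI (n : Nat) (i : Int) : Nat := if 0 ≤ i then i.toNat else n - (-i).toNat

-- bounded reachability closure of the INPUT graph (a graph property, not a run of
-- either port): nodes reachable from start following in-range adjacency entries,
-- never entering ignore.  addValid adds one normalised in-range entry if new.
def addValid (n g : Nat) (acc : List Nat) (y : Int) : List Nat :=
  if PySem.Raise.InRange n y ∧ nrmI n y ≠ g ∧ nrmI n y ∉ acc then acc ++ [nrmI n y] else acc

def rowFold (nodes : List (List Int)) (g : Nat) (acc : List Nat) (u : Nat) : List Nat :=
  (nodes.getD u []).foldl (addValid nodes.length g) acc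

def stepOnce (nodes : List (List Int)) (g : Nat) (S : List Nat) : List Nat :=
  S.foldl (rowFold nodes g) S

def citer (nodes : List (List Int)) (g : Nat) : Nat → List Nat → List Nat
  | 0, S => S
  | k + 1, S => citer nodes g k (stepOnce nodes g S)

def reachClos (nodes : List (List Int)) (s g : Nat) : List Nat :=
  citer nodes g nodes.length [s]

-- Pre_ holds exactly when the Python A returns (no IndexError): start and ignore are
-- valid indices, and every row the BFS actually scans — i.e. every node in the
-- reachability closure of start under in-range edges avoiding ignore — contains only
-- in-range entries.  Inputs outside Pre_ are exactly those where A raises IndexError.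
def Pre_get_tree_size (start : Int) (ignore : Int) (nodes : List (List Int)) : Prop :=
  PySem.Raise.InRange nodes.length start ∧ PySem.Raise.InRange nodes.length ignore ∧
  ∀ j ∈ reachClos nodes (nrmI nodes.length start) (nrmI nodes.length ignore),
    ∀ y ∈ nodes.getD j [], PySem.Raise.InRange nodes.length y
instance (start : Int) (ignore : Int) (nodes : List (List Int)) : Decidable (Pre_get_tree_size start ignore nodes) := by unfold Pre_get_tree_size; infer_instance

def pvWitness_get_tree_size : Int × Int × List (List Int) := (0, 1, [[1], [0]])

def Spec_get_tree_size (start : Int) (ignore : Int) (nodes : List (List Int)) (out : Int) : Prop := out = get_tree_size_alt start ignore nodes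
instance (start : Int) (ignore : Int) (nodes : List (List Int)) (out : Int) : Decidable (Spec_get_tree_size start ignore nodes out) := by unfold Spec_get_tree_size; infer_instance

-- ===== CLAIM (what is proved, stated in full; the proofs are below) =====
def Claim_equal_get_tree_size : Prop := ∀ (start : Int) (ignore : Int) (nodes : List (List Int)), Dom_get_tree_size start ignore nodes → Pre_get_tree_size start ignore nodes → Spec_get_tree_size start ignore nodes (get_tree_size start ignore nodes)

-- ===== LEMMAS AND PROOFS =====

-- "slot j of the boolean array v is set"
def vset (v : List Bool) (j : Nat) : Prop := v.getD j false = true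

def pcnt (v : List Bool) : Nat := v.count true

-- normalised adjacency
def adjN (nodes : List (List Int)) (j : Nat) : List Nat :=
  (nodes.getD j []).map (nrmI nodes.length)

-- nodes reachable from s along in-range edges that never ENTER g (g itself only as the start)
inductive Rch (nodes : List (List Int)) (s g : Nat) : Nat → Prop
  | base : Rch nodes s g s
  | step {u : Nat} {y : Int} : Rch nodes s g u → y ∈ nodes.getD u [] →
      PySem.Raise.InRange nodes.length y → nrmI nodes.length y ≠ g →
      Rch nodes s g (nrmI nodes.length y)

theorem pyIdx_inRange {n : Nat} {i : Int} (h : PySem.Raise.InRange n i) :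
    PySem.List.pyIdx? n i = some (nrmI n i) := by
  obtain ⟨h1, h2⟩ := h
  by_cases h0 : 0 ≤ i
  · simp [PySem.List.pyIdx?, nrmI, h0, h2]
  · simp [PySem.List.pyIdx?, nrmI, h0, h1]

theorem nrmI_lt {n : Nat} {i : Int} (h : PySem.Raise.InRange n i) : nrmI n i < n := by
  obtain ⟨h1, h2⟩ := h
  unfold nrmI
  split_ifs with h0 <;> omega

theorem nrmI_of_nonneg {n : Nat} {i : Int} (h : 0 ≤ i) : nrmI n i = i.toNat := by
  simp [nrmI, h]

theorem getD_bridge {α : Type} (xs : List α) (n : Nat) (hn : xs.length = n) (i : Int) (d : α)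
    (h : PySem.Raise.InRange n i) :
    PySem.List.pyGetD xs i d = xs.getD (nrmI n i) d := by
  subst hn
  unfold PySem.List.pyGetD PySem.List.pyGet?
  rw [pyIdx_inRange h]
  simp [List.getD_eq_getElem?_getD]

theorem setD_bridge {α : Type} (xs : List α) (n : Nat) (hn : xs.length = n) (i : Int) (w : α)
    (h : PySem.Raise.InRange n i) :
    PySem.List.pySetD xs i w = xs.set (nrmI n i) w := by
  subst hn
  unfold PySem.List.pySetD PySem.List.pySet?
  rw [pyIdx_inRange h]
  rfl

-- ---------- closure lemmas: Rch j → j ∈ reachClos ----------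

theorem addValid_prefix (n g : Nat) (acc : List Nat) (y : Int) :
    acc <+: addValid n g acc y := by
  unfold addValid
  split_ifs
  · exact List.prefix_append acc _
  · exact List.prefix_refl acc

theorem foldl_addValid_prefix (n g : Nat) : ∀ (l : List Int) (acc : List Nat),
    acc <+: l.foldl (addValid n g) acc := by
  intro l
  induction l with
  | nil => intro acc; exact List.prefix_refl acc
  | cons a t ih =>
    intro acc
    exact (addValid_prefix n g acc a).trans (ih (addValid n g acc a))

theorem rowFold_prefix (nodes : List (List Int)) (g : Nat) (acc : List Nat) (u : Nat) :
    acc <+: rowFold nodes g acc u :=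
  foldl_addValid_prefix nodes.length g _ acc

theorem foldl_rowFold_prefix (nodes : List (List Int)) (g : Nat) : ∀ (l : List Nat) (acc : List Nat),
    acc <+: l.foldl (rowFold nodes g) acc := by
  intro l
  induction l with
  | nil => intro acc; exact List.prefix_refl acc
  | cons a t ih =>
    intro acc
    exact (rowFold_prefix nodes g acc a).trans (ih (rowFold nodes g acc a))

theorem stepOnce_prefix (nodes : List (List Int)) (g : Nat) (S : List Nat) :
    S <+: stepOnce nodes g S :=
  foldl_rowFold_prefix nodes g S S

theorem addValid_nodup {n g : Nat} {acc : List Nat} (h : acc.Nodup) (y : Int) :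
    (addValid n g acc y).Nodup := by
  unfold addValid
  split_ifs with hc
  · simp only [List.nodup_append, List.nodup_singleton, true_and]
    refine ⟨h, ?_⟩
    intro a ha b hb
    rcases List.mem_singleton.1 hb with rfl
    exact fun he => hc.2.2 (he ▸ ha)
  · exact h

theorem addValid_lt {n g : Nat} {acc : List Nat} (h : ∀ x ∈ acc, x < n) (y : Int) :
    ∀ x ∈ addValid n g acc y, x < n := by
  unfold addValid
  split_ifs with hc
  · intro x hx
    rcases List.mem_append.1 hx with hx | hx
    · exact h x hx
    · rcases List.mem_singleton.1 hx with rfl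
      exact nrmI_lt hc.1
  · exact h

theorem foldl_addValid_nodup_lt (n g : Nat) : ∀ (l : List Int) (acc : List Nat),
    acc.Nodup → (∀ x ∈ acc, x < n) →
    (l.foldl (addValid n g) acc).Nodup ∧ ∀ x ∈ l.foldl (addValid n g) acc, x < n := by
  intro l
  induction l with
  | nil => intro acc h1 h2; exact ⟨h1, h2⟩
  | cons a t ih =>
    intro acc h1 h2
    exact ih (addValid n g acc a) (addValid_nodup h1 a) (addValid_lt h2 a)

theorem foldl_rowFold_nodup_lt (nodes : List (List Int)) (g : Nat) : ∀ (l : List Nat) (acc : List Nat),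
    acc.Nodup → (∀ x ∈ acc, x < nodes.length) →
    (l.foldl (rowFold nodes g) acc).Nodup ∧ ∀ x ∈ l.foldl (rowFold nodes g) acc, x < nodes.length := by
  intro l
  induction l with
  | nil => intro acc h1 h2; exact ⟨h1, h2⟩
  | cons a t ih =>
    intro acc h1 h2
    obtain ⟨g1, g2⟩ := foldl_addValid_nodup_lt nodes.length g (nodes.getD a []) acc h1 h2
    exact ih (rowFold nodes g acc a) g1 g2

theorem stepOnce_nodup_lt (nodes : List (List Int)) (g : Nat) (S : List Nat)
    (h1 : S.Nodup) (h2 : ∀ x ∈ S, x < nodes.length) :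
    (stepOnce nodes g S).Nodup ∧ ∀ x ∈ stepOnce nodes g S, x < nodes.length :=
  foldl_rowFold_nodup_lt nodes g S S h1 h2

-- one step is complete: every valid edge from a member of S lands in stepOnce S
theorem foldl_addValid_complete (n g : Nat) : ∀ (l : List Int) (acc : List Nat) (y : Int),
    y ∈ l → PySem.Raise.InRange n y → nrmI n y ≠ g →
    nrmI n y ∈ l.foldl (addValid n g) acc := by
  intro l
  induction l with
  | nil => intro acc y hy; exact absurd hy List.not_mem_nil
  | cons a t ih =>
    intro acc y hy h1 h2
    rcases List.mem_cons.1 hy with rfl | hy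
    · have hmem : nrmI n y ∈ addValid n g acc y := by
        unfold addValid
        split_ifs with hc
        · exact List.mem_append_right _ (List.mem_singleton.2 rfl)
        · by_contra hmem
          exact hc ⟨h1, h2, hmem⟩
      exact (foldl_addValid_prefix n g t _).subset hmem
    · exact ih _ y hy h1 h2

theorem foldl_rowFold_complete (nodes : List (List Int)) (g : Nat) :
    ∀ (l : List Nat) (acc : List Nat) (u : Nat) (y : Int),
    u ∈ l → y ∈ nodes.getD u [] → PySem.Raise.InRange nodes.length y → nrmI nodes.length y ≠ g →
    nrmI nodes.length y ∈ l.foldl (rowFold nodes g) acc := by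
  intro l
  induction l with
  | nil => intro acc u y hu; exact absurd hu List.not_mem_nil
  | cons a t ih =>
    intro acc u y hu hy h1 h2
    rcases List.mem_cons.1 hu with rfl | hu
    · have hmem : nrmI nodes.length y ∈ rowFold nodes g acc u :=
        foldl_addValid_complete nodes.length g _ acc y hy h1 h2
      exact (foldl_rowFold_prefix nodes g t _).subset hmem
    · exact ih _ u y hu hy h1 h2

theorem stepOnce_complete (nodes : List (List Int)) (g : Nat) (S : List Nat) (u : Nat) (y : Int)
    (hu : u ∈ S) (hy : y ∈ nodes.getD u []) (h1 : PySem.Raise.InRange nodes.length y)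
    (h2 : nrmI nodes.length y ≠ g) : nrmI nodes.length y ∈ stepOnce nodes g S :=
  foldl_rowFold_complete nodes g S S u y hu hy h1 h2

-- if S already contains every index < n, nothing is ever added
theorem foldl_addValid_full (n g : Nat) : ∀ (l : List Int) (acc : List Nat),
    (∀ j, j < n → j ∈ acc) → l.foldl (addValid n g) acc = acc := by
  intro l
  induction l with
  | nil => intro acc _; rfl
  | cons a t ih =>
    intro acc hfull
    have he : addValid n g acc a = acc := by
      unfold addValid
      split_ifs with hc
      · exact absurd (hfull _ (nrmI_lt hc.1)) hc.2.2
      · rfl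
    rw [List.foldl_cons, he, ih acc hfull]

theorem stepOnce_full (nodes : List (List Int)) (g : Nat) (S : List Nat)
    (hfull : ∀ j, j < nodes.length → j ∈ S) : stepOnce nodes g S = S := by
  unfold stepOnce
  have key : ∀ (l : List Nat), l.foldl (rowFold nodes g) S = S := by
    intro l
    induction l with
    | nil => rfl
    | cons a t ih =>
      rw [List.foldl_cons]
      unfold rowFold
      rw [foldl_addValid_full nodes.length g _ S hfull]
      exact ih
  exact key S

theorem full_of_nodup_lt {n : Nat} {S : List Nat} (h1 : S.Nodup) (h2 : ∀ x ∈ S, x < n)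
    (h3 : n ≤ S.length) : ∀ j, j < n → j ∈ S := by
  intro j hj
  have hsub : S.toFinset ⊆ Finset.range n := by
    intro x hx
    exact Finset.mem_range.2 (h2 x (List.mem_toFinset.1 hx))
  have hcard : (Finset.range n).card ≤ S.toFinset.card := by
    rw [Finset.card_range, List.toFinset_card_of_nodup h1]
    exact h3
  have heq : S.toFinset = Finset.range n := Finset.eq_of_subset_of_card_le hsub hcard
  have : j ∈ S.toFinset := heq ▸ Finset.mem_range.2 hj
  exact List.mem_toFinset.1 this

theorem citer_fix_of (nodes : List (List Int)) (g : Nat) {S : List Nat}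
    (h : stepOnce nodes g S = S) : ∀ k, citer nodes g k S = S := by
  intro k
  induction k with
  | zero => rfl
  | succ k ih =>
    show citer nodes g k (stepOnce nodes g S) = S
    rw [h, ih]

theorem citer_subset (nodes : List (List Int)) (g : Nat) : ∀ (k : Nat) (S : List Nat) (x : Nat),
    x ∈ S → x ∈ citer nodes g k S := by
  intro k
  induction k with
  | zero => intro S x hx; exact hx
  | succ k ih =>
    intro S x hx
    exact ih _ x ((stepOnce_prefix nodes g S).subset hx)

theorem citer_reaches_fix (nodes : List (List Int)) (g : Nat) : ∀ (k : Nat) (S : List Nat),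
    S.Nodup → (∀ x ∈ S, x < nodes.length) → nodes.length ≤ k + S.length →
    stepOnce nodes g (citer nodes g k S) = citer nodes g k S := by
  intro k
  induction k with
  | zero =>
    intro S h1 h2 h3
    exact stepOnce_full nodes g S (full_of_nodup_lt h1 h2 (by omega))
  | succ k ih =>
    intro S h1 h2 h3
    by_cases hfix : stepOnce nodes g S = S
    · rw [citer_fix_of nodes g hfix (k + 1), hfix]
    · obtain ⟨n1, n2⟩ := stepOnce_nodup_lt nodes g S h1 h2
      have hpref := stepOnce_prefix nodes g S
      have hlen : S.length < (stepOnce nodes g S).length := by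
        rcases Nat.lt_or_ge S.length (stepOnce nodes g S).length with h | h
        · exact h
        · exact absurd (hpref.eq_of_length_le h).symm hfix
      show stepOnce nodes g (citer nodes g k (stepOnce nodes g S)) =
        citer nodes g k (stepOnce nodes g S)
      exact ih (stepOnce nodes g S) n1 n2 (by omega)

theorem mem_reachClos_of_Rch (nodes : List (List Int)) (s g : Nat) (hs : s < nodes.length) :
    ∀ j, Rch nodes s g j → j ∈ reachClos nodes s g := by
  have hfix : stepOnce nodes g (reachClos nodes s g) = reachClos nodes s g :=
    citer_reaches_fix nodes g nodes.length [s] (by simp) (by simpa using hs) (by simp)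
  intro j hj
  induction hj with
  | base => exact citer_subset nodes g nodes.length [s] s (by simp)
  | @step u y hu hy h1 h2 ih =>
    have := stepOnce_complete nodes g (reachClos nodes s g) u y ih hy h1 h2
    rw [hfix] at this
    exact this

-- ---------- boolean-array lemmas ----------

theorem vset_lt {v : List Bool} {j : Nat} (h : vset v j) : j < v.length := by
  rcases Nat.lt_or_ge j v.length with hlt | hge
  · exact hlt
  · exfalso
    unfold vset at h
    rw [List.getD_eq_getElem?_getD, List.getElem?_eq_none (by omega)] at h
    simp at h

theorem getD_set_true (v : List Bool) (j k : Nat) (hj : j < v.length) :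
    (v.set j true).getD k false = true ↔ (k = j ∨ v.getD k false = true) := by
  induction v generalizing j k with
  | nil => simp at hj
  | cons a t ih =>
    cases j with
    | zero =>
      cases k with
      | zero => simp
      | succ k =>
        simp only [List.set_cons_zero, List.getD_cons_succ]
        constructor
        · exact fun h => Or.inr h
        · rintro (h | h)
          · omega
          · exact h
    | succ j =>
      cases k with
      | zero =>
        simp only [List.set_cons_succ, List.getD_cons_zero]
        constructor
        · exact fun h => Or.inr h
        · rintro (h | h)
          · omega
          · exact h
      | succ k =>
        simp only [List.set_cons_succ, List.getD_cons_succ]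
        rw [ih j k (by simpa using hj)]
        constructor
        · rintro (h | h)
          · exact Or.inl (by omega)
          · exact Or.inr h
        · rintro (h | h)
          · exact Or.inl (by omega)
          · exact Or.inr h

theorem vset_set_iff {v : List Bool} {j : Nat} (hj : j < v.length) (k : Nat) :
    vset (v.set j true) k ↔ (k = j ∨ vset v k) := by
  unfold vset
  exact getD_set_true v j k hj

theorem vset_set_self {v : List Bool} {j : Nat} (hj : j < v.length) : vset (v.set j true) j :=
  (vset_set_iff hj j).2 (Or.inl rfl)

theorem pcnt_le_length (v : List Bool) : pcnt v ≤ v.length := by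
  unfold pcnt
  exact List.count_le_length

theorem pcnt_cons_true (t : List Bool) : pcnt (true :: t) = pcnt t + 1 := by
  simp [pcnt]

theorem pcnt_cons_false (t : List Bool) : pcnt (false :: t) = pcnt t := by
  simp [pcnt]

theorem pcnt_set {v : List Bool} {j : Nat} (hj : j < v.length) (h : ¬ vset v j) :
    pcnt (v.set j true) = pcnt v + 1 := by
  induction v generalizing j with
  | nil => simp at hj
  | cons a t ih =>
    cases j with
    | zero =>
      have ha : a = false := by
        cases a
        · rfl
        · exact absurd (by simp [vset]) h
      subst ha
      simp only [List.set_cons_zero, pcnt_cons_true, pcnt_cons_false]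
    | succ j =>
      have h' : ¬ vset t j := fun hh => h (by simpa [vset, List.getD_cons_succ] using hh)
      have hrec := ih (by simpa using hj) h'
      cases a <;>
        simp only [List.set_cons_succ, pcnt_cons_true, pcnt_cons_false, hrec]

theorem pcnt_le_mono (v v' : List Bool) (hlen : v'.length = v.length)
    (mono : ∀ k, vset v k → vset v' k) : pcnt v ≤ pcnt v' := by
  induction v generalizing v' with
  | nil => simp [pcnt]
  | cons a t ih =>
    cases v' with
    | nil => simp at hlen
    | cons b t' =>
      have hm0 : a = true → b = true := fun ha => by
        have := mono 0 (by simp [vset, ha])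
        simpa [vset] using this
      have hmt : ∀ k, vset t k → vset t' k := fun k hk => by
        have := mono (k + 1) (by simpa [vset, List.getD_cons_succ] using hk)
        simpa [vset, List.getD_cons_succ] using this
      have hrec := ih t' (by simpa using hlen) hmt
      cases a with
      | false =>
        cases b <;>
          simp only [pcnt_cons_true, pcnt_cons_false] <;> omega
      | true =>
        have hb : b = true := hm0 rfl
        subst hb
        simp only [pcnt_cons_true]
        omega

theorem pcnt_lt_of_flip (v v' : List Bool) (hlen : v'.length = v.length)
    (mono : ∀ k, vset v k → vset v' k) (j : Nat) (h1 : ¬ vset v j) (h2 : vset v' j) :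
    pcnt v < pcnt v' := by
  induction v generalizing v' j with
  | nil =>
    cases v' with
    | nil => exact absurd (vset_lt h2) (by simp)
    | cons b t' => simp at hlen
  | cons a t ih =>
    cases v' with
    | nil => simp at hlen
    | cons b t' =>
      have hm0 : a = true → b = true := fun ha => by
        have := mono 0 (by simp [vset, ha])
        simpa [vset] using this
      have hmt : ∀ k, vset t k → vset t' k := fun k hk => by
        have := mono (k + 1) (by simpa [vset, List.getD_cons_succ] using hk)
        simpa [vset, List.getD_cons_succ] using this
      cases j with
      | zero =>
        have ha : a = false := by
          cases a
          · rfl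
          · exact absurd (by simp [vset]) h1
        have hb : b = true := by simpa [vset] using h2
        subst ha; subst hb
        have hle := pcnt_le_mono t t' (by simpa using hlen) hmt
        simp only [pcnt_cons_true, pcnt_cons_false]
        omega
      | succ j =>
        have h1' : ¬ vset t j := fun hh => h1 (by simpa [vset, List.getD_cons_succ] using hh)
        have h2' : vset t' j := by simpa [vset, List.getD_cons_succ] using h2
        have hrec := ih t' (by simpa using hlen) hmt j h1' h2'
        cases a with
        | false =>
          cases b <;>
            simp only [pcnt_cons_true, pcnt_cons_false] <;> omega
        | true =>
          have hb : b = true := hm0 rfl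
          subst hb
          simp only [pcnt_cons_true]
          omega

theorem eq_of_vset (v v' : List Bool) (hlen : v'.length = v.length)
    (h : ∀ j, vset v j ↔ vset v' j) : v = v' := by
  induction v generalizing v' with
  | nil =>
    cases v' with
    | nil => rfl
    | cons b t' => simp at hlen
  | cons a t ih =>
    cases v' with
    | nil => simp at hlen
    | cons b t' =>
      have h0 := h 0
      simp only [vset, List.getD_cons_zero] at h0
      have hab : a = b := by
        cases a <;> cases b <;> simp_all
      have ht : ∀ j, vset t j ↔ vset t' j := fun j => by
        have := h (j + 1)
        simpa [vset, List.getD_cons_succ] using this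
      rw [hab, ih t' (by simpa using hlen) ht]

theorem foldl_sum_pcnt (v : List Bool) : ∀ acc : Int,
    v.foldl (fun acc b => acc + (if b then 1 else 0)) acc = acc + (pcnt v : Int) := by
  induction v with
  | nil => intro acc; simp [pcnt]
  | cons a t ih =>
    intro acc
    cases a with
    | false =>
      simpa [pcnt_cons_false] using ih acc
    | true =>
      have hrec := ih (acc + 1)
      simp only [List.foldl_cons, if_true, pcnt_cons_true]
      rw [hrec]
      push_cast
      ring

theorem getD_replicate_false (n j : Nat) : (List.replicate n false).getD j false = false := by
  induction n generalizing j with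
  | zero => simp
  | succ n ih =>
    cases j with
    | zero => simp [List.replicate_succ]
    | succ j => simp [List.replicate_succ]

theorem vset_replicate (n j : Nat) : ¬ vset (List.replicate n false) j := by
  intro h
  unfold vset at h
  rw [getD_replicate_false] at h
  cases h

theorem pcnt_replicate (n : Nat) : pcnt (List.replicate n false) = 0 := by
  induction n with
  | zero => simp [pcnt]
  | succ n ih =>
    rw [List.replicate_succ, pcnt_cons_false, ih]

theorem mem_drop_append {α : Type} {qt app : List α} {k : Nat} {x : α}
    (h : x ∈ (qt ++ app).drop k) : x ∈ qt.drop k ∨ x ∈ app := by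
  induction qt generalizing k with
  | nil => exact Or.inr (List.mem_of_mem_drop (by simpa using h))
  | cons a t ih =>
    cases k with
    | zero =>
      rcases (by simpa using h : x = a ∨ x ∈ t ∨ x ∈ app) with h1 | h1 | h1
      · exact Or.inl (by simp [h1])
      · exact Or.inl (by simp [h1])
      · exact Or.inr h1
    | succ k =>
      rcases ih (by simpa [List.drop_succ_cons] using h) with h1 | h1
      · exact Or.inl (by simpa [List.drop_succ_cons] using h1)
      · exact Or.inr h1

theorem rch_g {nodes : List (List Int)} {s g u : Nat}
    (h : Rch nodes s g u) (he : u = g) : u = s := by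
  cases h with
  | base => rfl
  | step _ _ _ hne => exact absurd he hne

theorem rch_subset (nodes : List (List Int)) (s g : Nat) (vf : List Bool)
    (hs : vset vf s)
    (hexp : ∀ u, vset vf u → u ≠ g → ∀ w ∈ adjN nodes u, vset vf w)
    (hexps : ∀ w ∈ adjN nodes s, vset vf w) :
    ∀ j, Rch nodes s g j → vset vf j := by
  intro j h
  induction h with
  | base => exact hs
  | @step u y hu hy h1 hne ih =>
    have hw : nrmI nodes.length y ∈ adjN nodes u := by
      unfold adjN
      exact List.mem_map_of_mem hy
    by_cases hug : u = g
    · have hus : u = s := rch_g hu hug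
      subst hus
      exact hexps _ hw
    · exact hexp u ih hug _ hw

-- ---------- BFS (port A) invariants ----------

structure BInv (nodes : List (List Int)) (s g : Nat) (v : List Bool) (q : List Int) : Prop where
  len : v.length = nodes.length
  qrange : ∀ x ∈ q, PySem.Raise.InRange nodes.length x
  qrch : ∀ x ∈ q, Rch nodes s g (nrmI nodes.length x)
  gmark : vset v g
  smark : vset v s
  sound : ∀ j, vset v j → j = s ∨ j = g ∨ Rch nodes s g j
  cover : ∀ j, vset v j → (∃ x ∈ q, nrmI nodes.length x = j) ∨ (∀ w ∈ adjN nodes j, vset v w) ∨ (j = g ∧ g ≠ s)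

theorem bfs_scan (nodes : List (List Int)) (s g : Nat) :
    ∀ ns : List Int,
    (∀ x ∈ ns, PySem.Raise.InRange nodes.length x) →
    (∀ x ∈ ns, nrmI nodes.length x ≠ g → Rch nodes s g (nrmI nodes.length x)) →
    ∀ (v : List Bool) (c : Int) (q : List Int),
    v.length = nodes.length → vset v g → vset v s →
    (∀ j, vset v j → j = s ∨ j = g ∨ Rch nodes s g j) →
    ∀ v' c' q', ns.foldl pvA_scan (v, c, q) = (v', c', q') →
    (v'.length = v.length ∧
     (∀ j, vset v j → vset v' j) ∧
     c' + (pcnt v : Int) = c + (pcnt v' : Int) ∧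
     (∀ j, vset v' j → j = s ∨ j = g ∨ Rch nodes s g j) ∧
     vset v' g ∧ vset v' s ∧
     (∃ app, q' = q ++ app ∧ ∀ x ∈ app, PySem.Raise.InRange nodes.length x ∧
        Rch nodes s g (nrmI nodes.length x) ∧ ¬ vset v (nrmI nodes.length x) ∧
        vset v' (nrmI nodes.length x)) ∧
     (∀ x ∈ ns, vset v' (nrmI nodes.length x)) ∧
     (∀ j, vset v' j → vset v j ∨ ∃ x ∈ q', nrmI nodes.length x = j)) := by
  intro ns
  induction ns with
  | nil =>
    intro _ _ v c q hlen hg hs hsound v' c' q' hst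
    simp only [List.foldl_nil, Prod.mk.injEq] at hst
    obtain ⟨rfl, rfl, rfl⟩ := hst
    exact ⟨rfl, fun j h => h, by ring, hsound, hg, hs,
      ⟨[], by simp, by simp⟩, by simp, fun j h => Or.inl h⟩
  | cons a t ih =>
    intro hr hrch v c q hlen hg hs hsound v' c' q' hst
    have hra : PySem.Raise.InRange nodes.length a := hr a (List.mem_cons_self)
    have hrt : ∀ x ∈ t, PySem.Raise.InRange nodes.length x :=
      fun x hx => hr x (List.mem_cons_of_mem _ hx)
    have hrcht : ∀ x ∈ t, nrmI nodes.length x ≠ g → Rch nodes s g (nrmI nodes.length x) :=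
      fun x hx => hrch x (List.mem_cons_of_mem _ hx)
    simp only [List.foldl_cons] at hst
    by_cases hm : PySem.List.pyGetD v a false = false
    · -- a is unvisited: mark it, count it, append it
      have hscan : pvA_scan (v, c, q) a = (PySem.List.pySetD v a true, c + 1, q ++ [a]) := by
        simp [pvA_scan, hm]
      rw [hscan, setD_bridge v nodes.length hlen a true hra] at hst
      have hj0lt : nrmI nodes.length a < nodes.length := nrmI_lt hra
      have hj0v : nrmI nodes.length a < v.length := by omega
      have hmv : ¬ vset v (nrmI nodes.length a) := by
        rw [getD_bridge v nodes.length hlen a false hra] at hm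
        intro hh
        unfold vset at hh
        rw [hm] at hh
        cases hh
      have hlen1 : (v.set (nrmI nodes.length a) true).length = nodes.length := by
        simp [hlen]
      have hmono1 : ∀ j, vset v j → vset (v.set (nrmI nodes.length a) true) j :=
        fun j hj => (vset_set_iff hj0v j).2 (Or.inr hj)
      have hg1 : vset (v.set (nrmI nodes.length a) true) g := hmono1 g hg
      have hs1 : vset (v.set (nrmI nodes.length a) true) s := hmono1 s hs
      have hj0g : nrmI nodes.length a ≠ g := fun hh => hmv (hh ▸ hg)
      have hrchj0 : Rch nodes s g (nrmI nodes.length a) := hrch a (List.mem_cons_self) hj0g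
      have hsound1 : ∀ j, vset (v.set (nrmI nodes.length a) true) j →
          j = s ∨ j = g ∨ Rch nodes s g j := by
        intro j hj
        rcases (vset_set_iff hj0v j).1 hj with rfl | hj
        · exact Or.inr (Or.inr hrchj0)
        · exact hsound j hj
      obtain ⟨H1, H2, H3, H4, H5, H6, ⟨app, hq', happ⟩, H8, H9⟩ :=
        ih hrt hrcht (v.set (nrmI nodes.length a) true) (c + 1) (q ++ [a])
          hlen1 hg1 hs1 hsound1 v' c' q' hst
      have hq'' : q' = q ++ (a :: app) := by
        rw [hq', List.append_assoc]
        rfl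
      have hv'j0 : vset v' (nrmI nodes.length a) := H2 _ (vset_set_self hj0v)
      refine ⟨by rw [H1]; simp, fun j hj => H2 j (hmono1 j hj), ?_, H4, H5, H6, ?_, ?_, ?_⟩
      · rw [pcnt_set hj0v hmv] at H3
        push_cast at H3 ⊢
        omega
      · refine ⟨a :: app, hq'', ?_⟩
        intro x hx
        rcases List.mem_cons.1 hx with rfl | hx
        · exact ⟨hra, hrchj0, hmv, hv'j0⟩
        · obtain ⟨hx1, hx2, hx3, hx4⟩ := happ x hx
          exact ⟨hx1, hx2, fun hh => hx3 (hmono1 _ hh), hx4⟩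
      · intro x hx
        rcases List.mem_cons.1 hx with rfl | hx
        · exact hv'j0
        · exact H8 x hx
      · intro j hj
        rcases H9 j hj with hj1 | hj1
        · rcases (vset_set_iff hj0v j).1 hj1 with rfl | hj2
          · exact Or.inr ⟨a, by simp [hq''], rfl⟩
          · exact Or.inl hj2
        · exact Or.inr hj1
    · -- a already visited: no change
      have hscan : pvA_scan (v, c, q) a = (v, c, q) := by
        simp [pvA_scan, hm]
      rw [hscan] at hst
      have hva : vset v (nrmI nodes.length a) := by
        rw [getD_bridge v nodes.length hlen a false hra] at hm
        unfold vset
        cases hcase : v.getD (nrmI nodes.length a) false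
        · exact absurd hcase hm
        · rfl
      obtain ⟨H1, H2, H3, H4, H5, H6, H7, H8, H9⟩ :=
        ih hrt hrcht v c q hlen hg hs hsound v' c' q' hst
      refine ⟨H1, H2, H3, H4, H5, H6, H7, ?_, H9⟩
      intro x hx
      rcases List.mem_cons.1 hx with rfl | hx
      · exact H2 _ hva
      · exact H8 x hx

theorem bfs_level (nodes : List (List Int)) (s g : Nat)
    (hC : ∀ j, Rch nodes s g j → ∀ y ∈ nodes.getD j [], PySem.Raise.InRange nodes.length y) :
    ∀ (k : Nat) (q : List Int) (v : List Bool) (c : Int),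
    BInv nodes s g v q →
    ∀ q' v' c', pvA_level nodes k q v c = (q', v', c') →
    (BInv nodes s g v' q' ∧
     c' + (pcnt v : Int) = c + (pcnt v' : Int) ∧
     (∀ j, vset v j → vset v' j) ∧
     v'.length = v.length ∧
     (∀ x ∈ q', x ∈ q.drop k ∨ (¬ vset v (nrmI nodes.length x) ∧ vset v' (nrmI nodes.length x)))) := by
  intro k
  induction k with
  | zero =>
    intro q v c inv q' v' c' h
    simp only [pvA_level, Prod.mk.injEq] at h
    obtain ⟨rfl, rfl, rfl⟩ := h
    exact ⟨inv, by ring, fun j h => h, rfl, fun x hx => Or.inl (by simpa using hx)⟩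
  | succ k ih =>
    intro q v c inv q' v' c' h
    cases q with
    | nil =>
      simp only [pvA_level, Prod.mk.injEq] at h
      obtain ⟨rfl, rfl, rfl⟩ := h
      exact ⟨inv, by ring, fun j h => h, rfl, by simp⟩
    | cons cur qt =>
      simp only [pvA_level] at h
      rcases hfe : (PySem.List.pyGetD nodes cur []).foldl pvA_scan (v, c, qt) with ⟨v1, c1, q1⟩
      rw [hfe] at h
      have hcur : PySem.Raise.InRange nodes.length cur := inv.qrange cur (List.mem_cons_self)
      have hrow : PySem.List.pyGetD nodes cur [] = nodes.getD (nrmI nodes.length cur) [] :=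
        getD_bridge nodes nodes.length rfl cur [] hcur
      have hRcur : Rch nodes s g (nrmI nodes.length cur) := inv.qrch cur (List.mem_cons_self)
      have hr : ∀ x ∈ PySem.List.pyGetD nodes cur [], PySem.Raise.InRange nodes.length x := by
        rw [hrow]
        exact hC _ hRcur
      have hrch : ∀ x ∈ PySem.List.pyGetD nodes cur [],
          nrmI nodes.length x ≠ g → Rch nodes s g (nrmI nodes.length x) := by
        intro x hx hne
        exact Rch.step hRcur (by rw [← hrow]; exact hx) (hr x hx) hne
      obtain ⟨S1, S2, S3, S4, S5, S6, ⟨app, hq1, happ⟩, S8, S9⟩ :=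
        bfs_scan nodes s g (PySem.List.pyGetD nodes cur []) hr hrch v c qt
          inv.len inv.gmark inv.smark inv.sound v1 c1 q1 hfe
      have inv1 : BInv nodes s g v1 q1 := by
        refine ⟨by rw [S1, inv.len], ?_, ?_, S5, S6, S4, ?_⟩
        · rw [hq1]
          intro x hx
          rcases List.mem_append.1 hx with hx | hx
          · exact inv.qrange x (List.mem_cons_of_mem _ hx)
          · exact (happ x hx).1
        · rw [hq1]
          intro x hx
          rcases List.mem_append.1 hx with hx | hx
          · exact inv.qrch x (List.mem_cons_of_mem _ hx)
          · exact (happ x hx).2.1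
        · intro j hj
          rcases S9 j hj with hjold | hjq
          · rcases inv.cover j hjold with ⟨x, hx, hxe⟩ | hexp | hthird
            · rcases List.mem_cons.1 hx with rfl | hx
              · subst hxe
                refine Or.inr (Or.inl ?_)
                intro w hw
                unfold adjN at hw
                obtain ⟨y, hy, rfl⟩ := List.mem_map.1 hw
                exact S8 y (by rw [hrow]; exact hy)
              · exact Or.inl ⟨x, by rw [hq1]; exact List.mem_append_left _ hx, hxe⟩
            · exact Or.inr (Or.inl (fun w hw => S2 w (hexp w hw)))
            · exact Or.inr (Or.inr hthird)
          · exact Or.inl hjq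
      obtain ⟨L1, L2, L3, L4, L5⟩ := ih q1 v1 c1 inv1 q' v' c' h
      refine ⟨L1, by omega, fun j hj => L3 j (S2 j hj), by rw [L4, S1], ?_⟩
      intro x hx
      rcases L5 x hx with hxd | hflip
      · rw [hq1] at hxd
        rcases mem_drop_append hxd with hx1 | hx2
        · exact Or.inl (by simpa [List.drop_succ_cons] using hx1)
        · obtain ⟨hx1, hx2', hx3, hx4⟩ := happ x hx2
          exact Or.inr ⟨hx3, L3 _ hx4⟩
      · exact Or.inr ⟨fun hh => hflip.1 (S2 _ hh), hflip.2⟩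

theorem pvA_loop_nil (nodes : List (List Int)) : ∀ (f : Nat) (v : List Bool) (c : Int),
    pvA_loop nodes f [] v c = c := by
  intro f v c
  cases f <;> simp [pvA_loop]

theorem bfs_loop (nodes : List (List Int)) (s g : Nat)
    (hC : ∀ j, Rch nodes s g j → ∀ y ∈ nodes.getD j [], PySem.Raise.InRange nodes.length y) :
    ∀ (fuel : Nat) (q : List Int) (v : List Bool) (c : Int),
    v.length < fuel + pcnt v → BInv nodes s g v q →
    ∃ vf, pvA_loop nodes fuel q v c + (pcnt v : Int) = c + (pcnt vf : Int) ∧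
      vf.length = v.length ∧ (∀ j, vset v j → vset vf j) ∧
      (∀ j, vset vf j → j = s ∨ j = g ∨ Rch nodes s g j) ∧
      (∀ j, vset vf j → (∀ w ∈ adjN nodes j, vset vf w) ∨ (j = g ∧ g ≠ s)) := by
  intro fuel
  induction fuel with
  | zero =>
    intro q v c hf inv
    exact absurd hf (by have := pcnt_le_length v; omega)
  | succ f ih =>
    intro q v c hf inv
    by_cases hq : q = []
    · subst hq
      refine ⟨v, ?_, rfl, fun j h => h, inv.sound, ?_⟩
      · rw [pvA_loop_nil]
      · intro j hj
        rcases inv.cover j hj with ⟨x, hx, _⟩ | h2 | h3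
        · exact absurd hx List.not_mem_nil
        · exact Or.inl h2
        · exact Or.inr h3
    · rcases hle : pvA_level nodes q.length q v c with ⟨q1, v1, c1⟩
      obtain ⟨Linv, Lcoup, Lmono, Llen, Lnew⟩ :=
        bfs_level nodes s g hC q.length q v c inv q1 v1 c1 hle
      have hloop : pvA_loop nodes (f + 1) q v c = pvA_loop nodes f q1 v1 c1 := by
        simp only [pvA_loop, if_neg hq, hle]
      by_cases hq' : q1 = []
      · refine ⟨v1, ?_, Llen, Lmono, Linv.sound, ?_⟩
        · rw [hloop, hq', pvA_loop_nil]
          exact Lcoup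
        · intro j hj
          rcases Linv.cover j hj with ⟨x, hx, _⟩ | h2 | h3
          · rw [hq'] at hx
            exact absurd hx List.not_mem_nil
          · exact Or.inl h2
          · exact Or.inr h3
      · obtain ⟨x, hx⟩ := List.exists_mem_of_ne_nil _ hq'
        rcases Lnew x hx with hxd | ⟨hflip1, hflip2⟩
        · rw [List.drop_length] at hxd
          exact absurd hxd List.not_mem_nil
        · have hlt : pcnt v < pcnt v1 :=
            pcnt_lt_of_flip v _ Llen Lmono _ hflip1 hflip2
          have hf' : v1.length < f + pcnt v1 := by
            rw [Llen]; omega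
          obtain ⟨vf, C1, C2, C3, C4, C5⟩ := ih q1 v1 c1 hf' Linv
          refine ⟨vf, ?_, by rw [C2, Llen], fun j hj => C3 j (Lmono j hj), C4, C5⟩
          rw [hloop]
          omega

-- ---------- sweep (port B) invariants ----------

theorem sweep_near (nodes : List (List Int)) (s g : Nat) :
    ∀ ns : List Int,
    (∀ x ∈ ns, PySem.Raise.InRange nodes.length x) →
    (∀ x ∈ ns, nrmI nodes.length x ≠ g → Rch nodes s g (nrmI nodes.length x)) →
    ∀ (v r : List Bool) (ch : Bool),
    v.length = nodes.length → r.length = nodes.length →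
    (∀ j, vset v j ↔ (j = s ∨ j = g ∨ vset r j)) →
    (∀ j, vset r j → Rch nodes s g j) →
    ∀ v' r' ch', ns.foldl pvB_near (v, r, ch) = (v', r', ch') →
    (v'.length = v.length ∧ r'.length = r.length ∧
     (∀ j, vset v j → vset v' j) ∧ (∀ j, vset r j → vset r' j) ∧
     (∀ j, vset v' j ↔ (j = s ∨ j = g ∨ vset r' j)) ∧
     (∀ j, vset r' j → Rch nodes s g j) ∧
     pcnt v' + pcnt r = pcnt v + pcnt r' ∧
     (ch = true → ch' = true) ∧
     (ch' = false → v' = v ∧ r' = r ∧ ∀ x ∈ ns, vset v (nrmI nodes.length x)) ∧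
     (ch = false → ch' = true → ∃ j, ¬ vset v j ∧ vset v' j)) := by
  intro ns
  induction ns with
  | nil =>
    intro _ _ v r ch hlv hlr hiff hrsound v' r' ch' hst
    simp only [List.foldl_nil, Prod.mk.injEq] at hst
    obtain ⟨rfl, rfl, rfl⟩ := hst
    exact ⟨rfl, rfl, fun j h => h, fun j h => h, hiff, hrsound, by omega,
      fun h => h, fun _ => ⟨rfl, rfl, by simp⟩, fun h1 h2 => by rw [h1] at h2; exact absurd h2 (by simp)⟩
  | cons a t ih =>
    intro hr hrch v r ch hlv hlr hiff hrsound v' r' ch' hst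
    have hra : PySem.Raise.InRange nodes.length a := hr a (List.mem_cons_self)
    have hrt : ∀ x ∈ t, PySem.Raise.InRange nodes.length x :=
      fun x hx => hr x (List.mem_cons_of_mem _ hx)
    have hrcht : ∀ x ∈ t, nrmI nodes.length x ≠ g → Rch nodes s g (nrmI nodes.length x) :=
      fun x hx => hrch x (List.mem_cons_of_mem _ hx)
    simp only [List.foldl_cons] at hst
    by_cases hm : PySem.List.pyGetD v a false = false
    · -- unvisited: mark in both arrays, flag a change
      have hscan : pvB_near (v, r, ch) a =
          (PySem.List.pySetD v a true, PySem.List.pySetD r a true, true) := by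
        simp [pvB_near, hm]
      rw [hscan, setD_bridge v nodes.length hlv a true hra,
        setD_bridge r nodes.length hlr a true hra] at hst
      have hj0lt : nrmI nodes.length a < nodes.length := nrmI_lt hra
      have hj0v : nrmI nodes.length a < v.length := by omega
      have hj0r : nrmI nodes.length a < r.length := by omega
      have hmv : ¬ vset v (nrmI nodes.length a) := by
        rw [getD_bridge v nodes.length hlv a false hra] at hm
        intro hh
        unfold vset at hh
        rw [hm] at hh
        cases hh
      have hmr : ¬ vset r (nrmI nodes.length a) :=
        fun hh => hmv ((hiff _).2 (Or.inr (Or.inr hh)))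
      have hj0g : nrmI nodes.length a ≠ g := fun hh => hmv ((hiff _).2 (Or.inr (Or.inl hh)))
      have hrchj0 : Rch nodes s g (nrmI nodes.length a) := hrch a (List.mem_cons_self) hj0g
      have hmono1v : ∀ j, vset v j → vset (v.set (nrmI nodes.length a) true) j :=
        fun j hj => (vset_set_iff hj0v j).2 (Or.inr hj)
      have hmono1r : ∀ j, vset r j → vset (r.set (nrmI nodes.length a) true) j :=
        fun j hj => (vset_set_iff hj0r j).2 (Or.inr hj)
      have hiff1 : ∀ j, vset (v.set (nrmI nodes.length a) true) j ↔
          (j = s ∨ j = g ∨ vset (r.set (nrmI nodes.length a) true) j) := by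
        intro j
        rw [vset_set_iff hj0v j, vset_set_iff hj0r j, hiff j]
        tauto
      have hrsound1 : ∀ j, vset (r.set (nrmI nodes.length a) true) j → Rch nodes s g j := by
        intro j hj
        rcases (vset_set_iff hj0r j).1 hj with rfl | hj
        · exact hrchj0
        · exact hrsound j hj
      obtain ⟨H1, H2, H3, H4, H5, H6, H7, H8, H9, H10⟩ :=
        ih hrt hrcht (v.set (nrmI nodes.length a) true) (r.set (nrmI nodes.length a) true) true
          (by simp [hlv]) (by simp [hlr]) hiff1 hrsound1 v' r' ch' hst
      have hch' : ch' = true := H8 rfl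
      have hv'j0 : vset v' (nrmI nodes.length a) := H3 _ (vset_set_self hj0v)
      refine ⟨by rw [H1]; simp, by rw [H2]; simp,
        fun j hj => H3 j (hmono1v j hj), fun j hj => H4 j (hmono1r j hj),
        H5, H6, ?_, fun _ => hch', ?_, ?_⟩
      · rw [pcnt_set hj0v hmv, pcnt_set hj0r hmr] at H7
        omega
      · intro hc
        rw [hch'] at hc
        exact absurd hc (by simp)
      · intro _ _
        exact ⟨nrmI nodes.length a, hmv, hv'j0⟩
    · -- already visited: no change
      have hscan : pvB_near (v, r, ch) a = (v, r, ch) := by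
        simp [pvB_near, hm]
      rw [hscan] at hst
      have hva : vset v (nrmI nodes.length a) := by
        rw [getD_bridge v nodes.length hlv a false hra] at hm
        unfold vset
        cases hcase : v.getD (nrmI nodes.length a) false
        · exact absurd hcase hm
        · rfl
      obtain ⟨H1, H2, H3, H4, H5, H6, H7, H8, H9, H10⟩ :=
        ih hrt hrcht v r ch hlv hlr hiff hrsound v' r' ch' hst
      refine ⟨H1, H2, H3, H4, H5, H6, H7, H8, ?_, H10⟩
      intro hc
      obtain ⟨e1, e2, e3⟩ := H9 hc
      refine ⟨e1, e2, ?_⟩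
      intro x hx
      rcases List.mem_cons.1 hx with rfl | hx
      · exact hva
      · exact e3 x hx

theorem sweep_rows (nodes : List (List Int)) (s g : Nat)
    (hC : ∀ j, Rch nodes s g j → ∀ y ∈ nodes.getD j [], PySem.Raise.InRange nodes.length y) :
    ∀ us : List Int,
    (∀ u ∈ us, 0 ≤ u ∧ u < (nodes.length : Int)) →
    ∀ (v r : List Bool) (ch : Bool),
    v.length = nodes.length → r.length = nodes.length →
    (∀ j, vset v j ↔ (j = s ∨ j = g ∨ vset r j)) →
    (∀ j, vset r j → Rch nodes s g j) →
    ∀ v' r' ch', us.foldl (pvB_row nodes) (v, r, ch) = (v', r', ch') →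
    (v'.length = v.length ∧ r'.length = r.length ∧
     (∀ j, vset v j → vset v' j) ∧ (∀ j, vset r j → vset r' j) ∧
     (∀ j, vset v' j ↔ (j = s ∨ j = g ∨ vset r' j)) ∧
     (∀ j, vset r' j → Rch nodes s g j) ∧
     pcnt v' + pcnt r = pcnt v + pcnt r' ∧
     (ch = true → ch' = true) ∧
     (ch' = false → v' = v ∧ r' = r ∧
        ∀ u ∈ us, vset r u.toNat → ∀ w ∈ adjN nodes u.toNat, vset v w) ∧
     (ch = false → ch' = true → ∃ j, ¬ vset v j ∧ vset v' j)) := by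
  intro us
  induction us with
  | nil =>
    intro _ v r ch hlv hlr hiff hrsound v' r' ch' hst
    simp only [List.foldl_nil, Prod.mk.injEq] at hst
    obtain ⟨rfl, rfl, rfl⟩ := hst
    exact ⟨rfl, rfl, fun j h => h, fun j h => h, hiff, hrsound, by omega,
      fun h => h, fun _ => ⟨rfl, rfl, by simp⟩, fun h1 h2 => by rw [h1] at h2; exact absurd h2 (by simp)⟩
  | cons u ut ih =>
    intro hus v r ch hlv hlr hiff hrsound v' r' ch' hst
    have hu := hus u (List.mem_cons_self)
    have hut : ∀ x ∈ ut, 0 ≤ x ∧ x < (nodes.length : Int) :=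
      fun x hx => hus x (List.mem_cons_of_mem _ hx)
    have huir : PySem.Raise.InRange nodes.length u := ⟨by omega, hu.2⟩
    have hnu : nrmI nodes.length u = u.toNat := nrmI_of_nonneg hu.1
    have hulf : u.toNat < nodes.length := by omega
    simp only [List.foldl_cons] at hst
    by_cases hru : PySem.List.pyGetD r u false = true
    · -- row u is reached: scan its neighbours
      have hrow : pvB_row nodes (v, r, ch) u = (PySem.List.pyGetD nodes u []).foldl pvB_near (v, r, ch) := by
        simp [pvB_row, hru]
      rw [hrow] at hst
      rcases hfe : (PySem.List.pyGetD nodes u []).foldl pvB_near (v, r, ch) with ⟨mv, mr, mch⟩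
      rw [hfe] at hst
      have hrr : vset r u.toNat := by
        rw [getD_bridge r nodes.length hlr u false huir, hnu] at hru
        exact hru
      have hRu : Rch nodes s g u.toNat := hrsound _ hrr
      have hrowE : PySem.List.pyGetD nodes u [] = nodes.getD u.toNat [] := by
        rw [getD_bridge nodes nodes.length rfl u [] huir, hnu]
      have hrn : ∀ x ∈ PySem.List.pyGetD nodes u [], PySem.Raise.InRange nodes.length x := by
        rw [hrowE]
        exact hC _ hRu
      have hrchn : ∀ x ∈ PySem.List.pyGetD nodes u [],
          nrmI nodes.length x ≠ g → Rch nodes s g (nrmI nodes.length x) := by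
        intro x hx hne
        exact Rch.step hRu (by rw [← hrowE]; exact hx) (hrn x hx) hne
      obtain ⟨N1, N2, N3, N4, N5, N6, N7, N8, N9, N10⟩ :=
        sweep_near nodes s g (PySem.List.pyGetD nodes u []) hrn hrchn v r ch hlv hlr hiff hrsound
          mv mr mch hfe
      obtain ⟨R1, R2, R3, R4, R5, R6, R7, R8, R9, R10⟩ :=
        ih hut mv mr mch (by rw [N1, hlv]) (by rw [N2, hlr]) N5 N6 v' r' ch' hst
      refine ⟨by rw [R1, N1], by rw [R2, N2],
        fun j hj => R3 j (N3 j hj), fun j hj => R4 j (N4 j hj),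
        R5, R6, by omega, fun hc => R8 (N8 hc), ?_, ?_⟩
      · -- no change in the whole pass
        intro hc
        have hmidflag : mch = false := by
          cases hcase : mch
          · rfl
          · exact absurd (R8 hcase) (by rw [hc]; simp)
        obtain ⟨e1, e2, e3⟩ := N9 hmidflag
        obtain ⟨f1, f2, f3⟩ := R9 hc
        rw [e1] at f1
        rw [e2] at f2
        refine ⟨f1, f2, ?_⟩
        intro x hx hrx
        rcases List.mem_cons.1 hx with rfl | hx
        · intro w hw
          unfold adjN at hw
          obtain ⟨y, hy, rfl⟩ := List.mem_map.1 hw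
          exact e3 y (by rw [hrowE]; exact hy)
        · intro w hw
          have := f3 x hx (by rw [e2]; exact hrx) w hw
          rw [e1] at this
          exact this
      · -- a change appeared somewhere in the pass
        intro hc0 hc1
        cases hmid : mch
        · obtain ⟨e1, e2, _⟩ := N9 hmid
          obtain ⟨j, hj1, hj2⟩ := R10 hmid hc1
          rw [e1] at hj1
          exact ⟨j, hj1, hj2⟩
        · obtain ⟨j, hj1, hj2⟩ := N10 hc0 hmid
          exact ⟨j, hj1, R3 j hj2⟩
    · -- row u not reached: skip
      have hrow : pvB_row nodes (v, r, ch) u = (v, r, ch) := by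
        simp [pvB_row, hru]
      rw [hrow] at hst
      obtain ⟨R1, R2, R3, R4, R5, R6, R7, R8, R9, R10⟩ :=
        ih hut v r ch hlv hlr hiff hrsound v' r' ch' hst
      refine ⟨R1, R2, R3, R4, R5, R6, R7, R8, ?_, R10⟩
      intro hc
      obtain ⟨f1, f2, f3⟩ := R9 hc
      refine ⟨f1, f2, ?_⟩
      intro x hx hrx
      rcases List.mem_cons.1 hx with rfl | hx
      · exfalso
        rw [getD_bridge r nodes.length hlr x false huir, hnu] at hru
        exact hru hrx
      · exact f3 x hx hrx

theorem pvB_loop_false (nodes : List (List Int)) : ∀ (f : Nat) (v r : List Bool),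
    pvB_loop nodes f v r false = (v, r) := by
  intro f v r
  cases f <;> simp [pvB_loop]

theorem sweep_loop (nodes : List (List Int)) (s g : Nat)
    (hC : ∀ j, Rch nodes s g j → ∀ y ∈ nodes.getD j [], PySem.Raise.InRange nodes.length y) :
    ∀ (fuel : Nat) (v r : List Bool),
    v.length + 1 < fuel + pcnt v →
    v.length = nodes.length → r.length = nodes.length →
    (∀ j, vset v j ↔ (j = s ∨ j = g ∨ vset r j)) →
    (∀ j, vset r j → Rch nodes s g j) →
    ∀ vf rf, pvB_loop nodes fuel v r true = (vf, rf) →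
    (vf.length = v.length ∧ rf.length = r.length ∧
     (∀ j, vset v j → vset vf j) ∧ (∀ j, vset r j → vset rf j) ∧
     (∀ j, vset vf j ↔ (j = s ∨ j = g ∨ vset rf j)) ∧
     (∀ j, vset rf j → Rch nodes s g j) ∧
     pcnt vf + pcnt r = pcnt v + pcnt rf ∧
     (∀ u : Nat, vset rf u → ∀ w ∈ adjN nodes u, vset vf w)) := by
  intro fuel
  induction fuel with
  | zero =>
    intro v r hf
    exact absurd hf (by have := pcnt_le_length v; omega)
  | succ f ih =>
    intro v r hf hlv hlr hiff hrsound vf rf h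
    simp only [pvB_loop, if_true] at h
    rcases hfe : (PySem.List.pyRange 0 (nodes.length : Int) 1).foldl (pvB_row nodes) (v, r, false) with ⟨v1, r1, ch1⟩
    rw [hfe] at h
    have husP : ∀ u ∈ PySem.List.pyRange 0 (nodes.length : Int) 1, 0 ≤ u ∧ u < (nodes.length : Int) := by
      intro u hu
      exact (PySem.List.mem_pyRange_one).1 hu
    obtain ⟨R1, R2, R3, R4, R5, R6, R7, R8, R9, R10⟩ :=
      sweep_rows nodes s g hC (PySem.List.pyRange 0 (nodes.length : Int) 1) husP v r false
        hlv hlr hiff hrsound v1 r1 ch1 hfe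
    by_cases hflag : ch1 = true
    · obtain ⟨j, hj1, hj2⟩ := R10 rfl hflag
      have hlt : pcnt v < pcnt v1 :=
        pcnt_lt_of_flip v _ R1 R3 j hj1 hj2
      have hf' : v1.length + 1 < f + pcnt v1 := by
        rw [R1]; omega
      rw [hflag] at h
      obtain ⟨C1, C2, C3, C4, C5, C6, C7, C8⟩ :=
        ih v1 r1 hf' (by rw [R1, hlv]) (by rw [R2, hlr]) R5 R6 vf rf h
      exact ⟨by rw [C1, R1], by rw [C2, R2],
        fun j hj => C3 j (R3 j hj), fun j hj => C4 j (R4 j hj),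
        C5, C6, by omega, C8⟩
    · have hf2 : ch1 = false := by
        cases hb : ch1
        · rfl
        · exact absurd hb hflag
      obtain ⟨f1, f2, f3⟩ := R9 hf2
      rw [hf2, f1, f2, pvB_loop_false] at h
      simp only [Prod.mk.injEq] at h
      obtain ⟨rfl, rfl⟩ := h
      refine ⟨rfl, rfl, fun j h => h, fun j h => h, hiff, hrsound, by omega, ?_⟩
      intro u hu w hw
      have hun : u < nodes.length := by
        have := vset_lt hu
        omega
      have humem : (u : Int) ∈ PySem.List.pyRange 0 (nodes.length : Int) 1 := by
        rw [PySem.List.mem_pyRange_one]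
        exact ⟨Int.natCast_nonneg u, by exact_mod_cast hun⟩
      have := f3 (u : Int) humem (by simpa using hu) w (by simpa using hw)
      exact this

-- ---------- final characterisations ----------

theorem bfs_final (start ignore : Int) (nodes : List (List Int))
    (h1 : PySem.Raise.InRange nodes.length start)
    (h2 : PySem.Raise.InRange nodes.length ignore)
    (hC : ∀ j, Rch nodes (nrmI nodes.length start) (nrmI nodes.length ignore) j →
      ∀ y ∈ nodes.getD j [], PySem.Raise.InRange nodes.length y) :
    ∃ vf : List Bool,
      get_tree_size start ignore nodes +
        (pcnt (((List.replicate nodes.length false).set (nrmI nodes.length start) true).set (nrmI nodes.length ignore) true) : Int)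
        = 1 + (pcnt vf : Int) ∧
      vf.length = nodes.length ∧
      (∀ j, vset vf j ↔ (j = nrmI nodes.length start ∨ j = nrmI nodes.length ignore ∨
          Rch nodes (nrmI nodes.length start) (nrmI nodes.length ignore) j)) := by
  have hsn : nrmI nodes.length start < nodes.length := nrmI_lt h1
  have hgn : nrmI nodes.length ignore < nodes.length := nrmI_lt h2
  have e1 : PySem.List.pySetD (List.replicate nodes.length false) start true =
      (List.replicate nodes.length false).set (nrmI nodes.length start) true :=
    setD_bridge _ nodes.length (by simp) start true h1
  have e2 : PySem.List.pySetD ((List.replicate nodes.length false).set (nrmI nodes.length start) true) ignore true =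
      ((List.replicate nodes.length false).set (nrmI nodes.length start) true).set (nrmI nodes.length ignore) true :=
    setD_bridge _ nodes.length (by simp) ignore true h2
  have hport : get_tree_size start ignore nodes =
      pvA_loop nodes (nodes.length + 1) [start]
        (((List.replicate nodes.length false).set (nrmI nodes.length start) true).set (nrmI nodes.length ignore) true) 1 := by
    unfold get_tree_size
    rw [e1, e2]
  have hlen0 : (((List.replicate nodes.length false).set (nrmI nodes.length start) true).set (nrmI nodes.length ignore) true).length = nodes.length := by
    simp
  have hvset0 : ∀ j, vset (((List.replicate nodes.length false).set (nrmI nodes.length start) true).set (nrmI nodes.length ignore) true) j ↔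
      (j = nrmI nodes.length ignore ∨ j = nrmI nodes.length start) := by
    intro j
    rw [vset_set_iff (by simp [hgn]) j, vset_set_iff (by simp [hsn]) j]
    simp [vset_replicate]
  have hs0 : vset (((List.replicate nodes.length false).set (nrmI nodes.length start) true).set (nrmI nodes.length ignore) true) (nrmI nodes.length start) :=
    (hvset0 _).2 (Or.inr rfl)
  have hg0 : vset (((List.replicate nodes.length false).set (nrmI nodes.length start) true).set (nrmI nodes.length ignore) true) (nrmI nodes.length ignore) :=
    (hvset0 _).2 (Or.inl rfl)
  have inv : BInv nodes (nrmI nodes.length start) (nrmI nodes.length ignore)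
      (((List.replicate nodes.length false).set (nrmI nodes.length start) true).set (nrmI nodes.length ignore) true) [start] := by
    refine ⟨hlen0, ?_, ?_, hg0, hs0, ?_, ?_⟩
    · intro x hx
      rcases List.mem_singleton.1 hx with rfl
      exact h1
    · intro x hx
      rcases List.mem_singleton.1 hx with rfl
      exact Rch.base
    · intro j hj
      rcases (hvset0 j).1 hj with rfl | rfl
      · exact Or.inr (Or.inl rfl)
      · exact Or.inl rfl
    · intro j hj
      rcases (hvset0 j).1 hj with rfl | rfl
      · by_cases hgs : nrmI nodes.length ignore = nrmI nodes.length start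
        · exact Or.inl ⟨start, List.mem_cons_self, hgs.symm ▸ rfl⟩
        · exact Or.inr (Or.inr ⟨rfl, fun hh => hgs (by rw [hh])⟩)
      · exact Or.inl ⟨start, List.mem_cons_self, rfl⟩
  have hfuel : (((List.replicate nodes.length false).set (nrmI nodes.length start) true).set (nrmI nodes.length ignore) true).length <
      (nodes.length + 1) + pcnt (((List.replicate nodes.length false).set (nrmI nodes.length start) true).set (nrmI nodes.length ignore) true) := by
    rw [hlen0]; omega
  obtain ⟨vf, C1, C2, C3, C4, C5⟩ :=
    bfs_loop nodes (nrmI nodes.length start) (nrmI nodes.length ignore) hC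
      (nodes.length + 1) [start] _ 1 hfuel inv
  refine ⟨vf, by rw [hport]; exact C1, by rw [C2, hlen0], ?_⟩
  have hvfs : vset vf (nrmI nodes.length start) := C3 _ hs0
  have hvfg : vset vf (nrmI nodes.length ignore) := C3 _ hg0
  have hexp : ∀ u, vset vf u → u ≠ nrmI nodes.length ignore →
      ∀ w ∈ adjN nodes u, vset vf w := by
    intro u hu hne
    rcases C5 u hu with h | h
    · exact h
    · exact absurd h.1 hne
  have hexps : ∀ w ∈ adjN nodes (nrmI nodes.length start), vset vf w := by
    rcases C5 _ hvfs with h | h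
    · exact h
    · exact absurd h.1.symm h.2
  have hcomp := rch_subset nodes (nrmI nodes.length start) (nrmI nodes.length ignore) vf hvfs hexp hexps
  intro j
  constructor
  · exact C4 j
  · rintro (rfl | rfl | hj)
    · exact hvfs
    · exact hvfg
    · exact hcomp j hj

theorem sweep_final (start ignore : Int) (nodes : List (List Int))
    (h1 : PySem.Raise.InRange nodes.length start)
    (h2 : PySem.Raise.InRange nodes.length ignore)
    (hC : ∀ j, Rch nodes (nrmI nodes.length start) (nrmI nodes.length ignore) j →
      ∀ y ∈ nodes.getD j [], PySem.Raise.InRange nodes.length y) :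
    ∃ (vf rf : List Bool),
      get_tree_size_alt start ignore nodes = (pcnt rf : Int) ∧
      pcnt vf + pcnt ((List.replicate nodes.length false).set (nrmI nodes.length start) true) =
        pcnt (((List.replicate nodes.length false).set (nrmI nodes.length start) true).set (nrmI nodes.length ignore) true) + pcnt rf ∧
      vf.length = nodes.length ∧
      (∀ j, vset vf j ↔ (j = nrmI nodes.length start ∨ j = nrmI nodes.length ignore ∨
          Rch nodes (nrmI nodes.length start) (nrmI nodes.length ignore) j)) := by
  have hsn : nrmI nodes.length start < nodes.length := nrmI_lt h1
  have hgn : nrmI nodes.length ignore < nodes.length := nrmI_lt h2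
  have e1 : PySem.List.pySetD (List.replicate nodes.length false) start true =
      (List.replicate nodes.length false).set (nrmI nodes.length start) true :=
    setD_bridge _ nodes.length (by simp) start true h1
  have e2 : PySem.List.pySetD ((List.replicate nodes.length false).set (nrmI nodes.length start) true) ignore true =
      ((List.replicate nodes.length false).set (nrmI nodes.length start) true).set (nrmI nodes.length ignore) true :=
    setD_bridge _ nodes.length (by simp) ignore true h2
  have hport : get_tree_size_alt start ignore nodes =
      (pvB_loop nodes (nodes.length + 2)
        (((List.replicate nodes.length false).set (nrmI nodes.length start) true).set (nrmI nodes.length ignore) true)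
        ((List.replicate nodes.length false).set (nrmI nodes.length start) true) true).2.foldl
          (fun acc b => acc + (if b then 1 else 0)) 0 := by
    unfold get_tree_size_alt
    rw [e1, e2]
  have hlen0 : (((List.replicate nodes.length false).set (nrmI nodes.length start) true).set (nrmI nodes.length ignore) true).length = nodes.length := by
    simp
  have hlenr0 : ((List.replicate nodes.length false).set (nrmI nodes.length start) true).length = nodes.length := by
    simp
  have hvset0 : ∀ j, vset (((List.replicate nodes.length false).set (nrmI nodes.length start) true).set (nrmI nodes.length ignore) true) j ↔
      (j = nrmI nodes.length ignore ∨ j = nrmI nodes.length start) := by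
    intro j
    rw [vset_set_iff (by simp [hgn]) j, vset_set_iff (by simp [hsn]) j]
    simp [vset_replicate]
  have hrset0 : ∀ j, vset ((List.replicate nodes.length false).set (nrmI nodes.length start) true) j ↔
      j = nrmI nodes.length start := by
    intro j
    rw [vset_set_iff (by simp [hsn]) j]
    simp [vset_replicate]
  have hiff0 : ∀ j, vset (((List.replicate nodes.length false).set (nrmI nodes.length start) true).set (nrmI nodes.length ignore) true) j ↔
      (j = nrmI nodes.length start ∨ j = nrmI nodes.length ignore ∨
        vset ((List.replicate nodes.length false).set (nrmI nodes.length start) true) j) := by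
    intro j
    rw [hvset0 j, hrset0 j]
    tauto
  have hrsound0 : ∀ j, vset ((List.replicate nodes.length false).set (nrmI nodes.length start) true) j →
      Rch nodes (nrmI nodes.length start) (nrmI nodes.length ignore) j := by
    intro j hj
    rw [hrset0 j] at hj
    subst hj
    exact Rch.base
  have hfuel : (((List.replicate nodes.length false).set (nrmI nodes.length start) true).set (nrmI nodes.length ignore) true).length + 1 <
      (nodes.length + 2) + pcnt (((List.replicate nodes.length false).set (nrmI nodes.length start) true).set (nrmI nodes.length ignore) true) := by
    rw [hlen0]; omega
  rcases hfe : pvB_loop nodes (nodes.length + 2)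
      (((List.replicate nodes.length false).set (nrmI nodes.length start) true).set (nrmI nodes.length ignore) true)
      ((List.replicate nodes.length false).set (nrmI nodes.length start) true) true with ⟨vf, rf⟩
  rw [hfe] at hport
  obtain ⟨C1, C2, C3, C4, C5, C6, C7, C8⟩ :=
    sweep_loop nodes (nrmI nodes.length start) (nrmI nodes.length ignore) hC
      (nodes.length + 2) _ _ hfuel hlen0 hlenr0 hiff0 hrsound0 vf rf hfe
  have hrs : vset rf (nrmI nodes.length start) :=
    C4 _ ((hrset0 _).2 rfl)
  have hcomp : ∀ j, Rch nodes (nrmI nodes.length start) (nrmI nodes.length ignore) j →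
      vset rf j := by
    intro j hj
    induction hj with
    | base => exact hrs
    | @step u y hu hy hyr hne ih =>
      have hw : nrmI nodes.length y ∈ adjN nodes u := by
        unfold adjN
        exact List.mem_map_of_mem hy
      have hv := C8 u ih _ hw
      rcases (C5 _).1 hv with he | he | h
      · rw [he]; exact hrs
      · exact absurd he hne
      · exact h
  refine ⟨vf, rf, by rw [hport]; simp [foldl_sum_pcnt], by omega, by rw [C1, hlen0], ?_⟩
  intro j
  constructor
  · intro hj
    rcases (C5 j).1 hj with rfl | rfl | h
    · exact Or.inl rfl
    · exact Or.inr (Or.inl rfl)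
    · exact Or.inr (Or.inr (C6 j h))
  · rintro (rfl | rfl | hj)
    · exact C3 _ ((hvset0 _).2 (Or.inr rfl))
    · exact C3 _ ((hvset0 _).2 (Or.inl rfl))
    · exact (C5 j).2 (Or.inr (Or.inr (hcomp j hj)))

-- ===== VERDICT (by name: the statement is the Claim_ definition above) =====
theorem get_tree_size_spec : Claim_equal_get_tree_size := by
  intro start ignore nodes hdom hpre
  unfold Spec_get_tree_size
  obtain ⟨h1, h2, h3⟩ := hpre
  have hC : ∀ j, Rch nodes (nrmI nodes.length start) (nrmI nodes.length ignore) j →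
      ∀ y ∈ nodes.getD j [], PySem.Raise.InRange nodes.length y := by
    intro j hj
    exact h3 j (mem_reachClos_of_Rch nodes _ _ (nrmI_lt h1) j hj)
  obtain ⟨vfA, A1, A2, A3⟩ := bfs_final start ignore nodes h1 h2 hC
  obtain ⟨vfB, rf, B1, B2, B3, B4⟩ := sweep_final start ignore nodes h1 h2 hC
  have hveq : vfA = vfB := eq_of_vset vfA vfB (by rw [A2, B3])
    (fun j => (A3 j).trans (B4 j).symm)
  have hr0 : pcnt ((List.replicate nodes.length false).set (nrmI nodes.length start) true) = 1 := by
    rw [pcnt_set (by simpa using nrmI_lt h1) (vset_replicate _ _), pcnt_replicate]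
  rw [hveq] at A1
  rw [B1]
  omega
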